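-- pv_equiv track=rewrite | github.com/PepperXZC/MRI-Simulator-cpp | python/image.py | get_3_point_index
-- ===== SOURCE A (Python) =====
-- def get_3_point_index(length, bandwidth):
--     # 矩形
--     # TODO：生成两个 point_index 集合
--     center = [15, 55, 105]
--     b = int(bandwidth // 2)
--     li_vassel, li_muscle = [[] for _ in range(3)], []
--
--     for i in range(length):
--         for j in range(length):
--             flag = 0
--             for c in range(len(center)):
--                 __center = 128 - center[c]
--                 lower, upper = __center - b, __center + b
--                 if j >= lower + 1 and j < upper + 1:
--                     li_vassel[c].append((i, j))
--                     flag = 1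
--                     break
--             if flag == 0:
--                 li_muscle.append((i, j))
--     return li_vassel, li_muscle
-- ===== SOURCE B (Python) =====
-- def get_3_point_index(length, bandwidth):
--     # Partition columns once into band/muscle, then cross with rows.
--     centers = [128 - c for c in (15, 55, 105)]
--     b = bandwidth // 2
--
--     def band(j):
--         for c, cc in enumerate(centers):
--             if cc - b + 1 <= j <= cc + b:
--                 return c
--         return None
--
--     J = [[j for j in range(length) if band(j) == c] for c in range(3)]
--     Jm = [j for j in range(length) if band(j) is None]
--     li_vassel = [[(i, j) for i in range(length) for j in Jc] for Jc in J]
--     li_muscle = [(i, j) for i in range(length) for j in Jm]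
--     return li_vassel, li_muscle
-- ===== Notes on version B (the rewrite author's own statement) =====
-- stated objective: simpler
-- what changed: A classifies each of the length^2 grid cells by scanning the 3 centers with a flag/break; B partitions the column indices into the 3 bands and muscle once and builds every output list directly as a rows-by-columns cross product, with no per-cell branching or shared mutable lists.
import Mathlib
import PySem

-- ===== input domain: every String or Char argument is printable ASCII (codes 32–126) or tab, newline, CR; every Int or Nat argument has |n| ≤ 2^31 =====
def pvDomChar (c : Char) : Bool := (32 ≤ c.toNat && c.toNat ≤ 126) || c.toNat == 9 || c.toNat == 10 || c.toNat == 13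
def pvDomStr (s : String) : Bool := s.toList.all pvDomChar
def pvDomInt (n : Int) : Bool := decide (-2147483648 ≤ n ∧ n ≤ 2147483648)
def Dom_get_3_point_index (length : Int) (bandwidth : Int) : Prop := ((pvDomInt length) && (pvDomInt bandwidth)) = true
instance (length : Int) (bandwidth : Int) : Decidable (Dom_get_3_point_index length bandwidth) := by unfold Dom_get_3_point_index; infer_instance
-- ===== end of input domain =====

-- B replaces A's per-cell 3-center scan by partitioning the columns once and building each
-- output list as a rows × columns cross product (objective: simpler; same exact output).

-- ===== PORT A =====
def pvCentersA : List Int := [15, 55, 105]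

-- inner `for c in range(len(center))` loop with its flag/break, step for step
def pvScanA (b i j : Int) (vassel : List (List (Int × Int))) : List Nat → List (List (Int × Int)) × Bool
  | [] => (vassel, false)
  | c :: rest =>
    let cen := pvCentersA.getD c 0
    let ccenter := 128 - cen
    let lower := ccenter - b
    let upper := ccenter + b
    if lower + 1 ≤ j ∧ j < upper + 1 then
      (vassel.modify c (· ++ [(i, j)]), true)
    else pvScanA b i j vassel rest

def get_3_point_index (length : Int) (bandwidth : Int) : (List (List (Int × Int))) × (List (Int × Int)) :=
  let b := PySem.Int.floordiv bandwidth 2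
  (PySem.List.pyRange 0 length 1).foldl (fun st i =>
    (PySem.List.pyRange 0 length 1).foldl (fun st j =>
      match pvScanA b i j st.1 (List.range pvCentersA.length) with
      | (v, true) => (v, st.2)
      | (v, false) => (v, st.2 ++ [(i, j)])) st) ([[], [], []], [])

-- ===== PORT B =====
def pvCentersB : List Int := [15, 55, 105].map (fun c => 128 - c)

-- `band(j)`: first enumerated center whose band contains j
def pvBandLoop (b j : Int) : List (Int × Int) → Option Int
  | [] => none
  | (c, cc) :: rest => if cc - b + 1 ≤ j ∧ j ≤ cc + b then some c else pvBandLoop b j rest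

def pvBand (b j : Int) : Option Int := pvBandLoop b j (PySem.List.enumerate pvCentersB)

def get_3_point_index_alt (length : Int) (bandwidth : Int) : (List (List (Int × Int))) × (List (Int × Int)) :=
  let b := PySem.Int.floordiv bandwidth 2
  let rng := PySem.List.pyRange 0 length 1
  let J := (PySem.List.pyRange 0 3 1).map (fun c => rng.filter (fun j => pvBand b j == some c))
  let Jm := rng.filter (fun j => pvBand b j == none)
  let li_vassel := J.map (fun Jc => rng.flatMap (fun i => Jc.map (fun j => (i, j))))
  let li_muscle := rng.flatMap (fun i => Jm.map (fun j => (i, j)))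
  (li_vassel, li_muscle)

-- ===== PRECONDITION & SPEC =====
def Spec_get_3_point_index (length : Int) (bandwidth : Int) (out : (List (List (Int × Int))) × (List (Int × Int))) : Prop := out = get_3_point_index_alt length bandwidth
instance (length : Int) (bandwidth : Int) (out : (List (List (Int × Int))) × (List (Int × Int))) : Decidable (Spec_get_3_point_index length bandwidth out) := by unfold Spec_get_3_point_index; infer_instance

-- ===== CLAIM (what is proved, stated in full; the proofs are below) =====
def Claim_equal_get_3_point_index : Prop := ∀ (length : Int) (bandwidth : Int), Dom_get_3_point_index length bandwidth → Spec_get_3_point_index length bandwidth (get_3_point_index length bandwidth)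

-- ===== LEMMAS AND PROOFS =====

def pvQ0 (b j : Int) : Bool := decide (113 - b + 1 ≤ j ∧ j < 113 + b + 1)
def pvQ1 (b j : Int) : Bool := !pvQ0 b j && decide (73 - b + 1 ≤ j ∧ j < 73 + b + 1)
def pvQ2 (b j : Int) : Bool := !pvQ0 b j && !decide ((73:Int) - b + 1 ≤ j ∧ j < 73 + b + 1) && decide (23 - b + 1 ≤ j ∧ j < 23 + b + 1)
def pvQm (b j : Int) : Bool := !pvQ0 b j && !pvQ1 b j && !pvQ2 b j

lemma pvScanA_eq (b i j : Int) (v0 v1 v2 : List (Int × Int)) :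
    pvScanA b i j [v0, v1, v2] (List.range 3) =
      if 113 - b + 1 ≤ j ∧ j < 113 + b + 1 then ([v0 ++ [(i, j)], v1, v2], true)
      else if 73 - b + 1 ≤ j ∧ j < 73 + b + 1 then ([v0, v1 ++ [(i, j)], v2], true)
      else if 23 - b + 1 ≤ j ∧ j < 23 + b + 1 then ([v0, v1, v2 ++ [(i, j)]], true)
      else ([v0, v1, v2], false) := by
  have h3 : List.range 3 = [0, 1, 2] := by decide
  rw [h3]
  simp only [pvScanA, pvCentersA, List.getD_cons_zero, List.getD_cons_succ, List.modify]
  norm_num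

lemma pvRowA (b i : Int) (js : List Int) (v0 v1 v2 : List (Int × Int)) (m : List (Int × Int)) :
    js.foldl (fun st j =>
      match pvScanA b i j st.1 (List.range pvCentersA.length) with
      | (v, true) => (v, st.2)
      | (v, false) => (v, st.2 ++ [(i, j)])) ([v0, v1, v2], m)
    = ([v0 ++ (js.filter (pvQ0 b)).map (fun j => (i, j)),
        v1 ++ (js.filter (pvQ1 b)).map (fun j => (i, j)),
        v2 ++ (js.filter (pvQ2 b)).map (fun j => (i, j))],
       m ++ (js.filter (pvQm b)).map (fun j => (i, j))) := by
  have hlen : pvCentersA.length = 3 := by decide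
  rw [hlen]
  induction js generalizing v0 v1 v2 m with
  | nil => simp
  | cons j js ih =>
    rw [List.foldl_cons, pvScanA_eq]
    by_cases hP0 : 113 - b + 1 ≤ j ∧ j < 113 + b + 1
    · have hq0 : pvQ0 b j = true := by simp [pvQ0, hP0]
      have hq1 : pvQ1 b j = false := by simp [pvQ1, hq0]
      have hq2 : pvQ2 b j = false := by simp [pvQ2, hq0]
      have hqm : pvQm b j = false := by simp [pvQm, hq0]
      simp only [if_pos hP0, List.filter_cons, hq0, hq1, hq2, hqm, if_true, if_false,
        Bool.false_eq_true, List.map_cons, ih]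
      simp [List.append_assoc]
    · have hq0 : pvQ0 b j = false := by simp only [pvQ0]; simp; omega
      by_cases hP1 : 73 - b + 1 ≤ j ∧ j < 73 + b + 1
      · have hq1 : pvQ1 b j = true := by simp [pvQ1, hq0, hP1]
        have hq2 : pvQ2 b j = false := by simp only [pvQ2]; simp; omega
        have hqm : pvQm b j = false := by simp [pvQm, hq1]
        simp only [if_neg hP0, if_pos hP1, List.filter_cons, hq0, hq1, hq2, hqm, if_true, if_false,
          Bool.false_eq_true, List.map_cons, ih]
        simp [List.append_assoc]
      · have hq1 : pvQ1 b j = false := by simp only [pvQ1, hq0]; simp; omega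
        by_cases hP2 : 23 - b + 1 ≤ j ∧ j < 23 + b + 1
        · have hq2 : pvQ2 b j = true := by simp only [pvQ2, hq0]; simp [hP2]; omega
          have hqm : pvQm b j = false := by simp [pvQm, hq2]
          simp only [if_neg hP0, if_neg hP1, if_pos hP2, List.filter_cons, hq0, hq1, hq2, hqm,
            if_true, if_false, Bool.false_eq_true, List.map_cons, ih]
          simp [List.append_assoc]
        · have hq2 : pvQ2 b j = false := by simp only [pvQ2, hq0]; simp; omega
          have hqm : pvQm b j = true := by simp [pvQm, hq0, hq1, hq2]
          simp only [if_neg hP0, if_neg hP1, if_neg hP2, List.filter_cons, hq0, hq1, hq2, hqm,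
            if_true, if_false, Bool.false_eq_true, List.map_cons, ih]
          simp [List.append_assoc]

lemma pvOuterA (b : Int) (is js : List Int) (v0 v1 v2 : List (Int × Int)) (m : List (Int × Int)) :
    is.foldl (fun st i => js.foldl (fun st j =>
      match pvScanA b i j st.1 (List.range pvCentersA.length) with
      | (v, true) => (v, st.2)
      | (v, false) => (v, st.2 ++ [(i, j)])) st) ([v0, v1, v2], m)
    = ([v0 ++ is.flatMap (fun i => (js.filter (pvQ0 b)).map (fun j => (i, j))),
        v1 ++ is.flatMap (fun i => (js.filter (pvQ1 b)).map (fun j => (i, j))),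
        v2 ++ is.flatMap (fun i => (js.filter (pvQ2 b)).map (fun j => (i, j)))],
       m ++ is.flatMap (fun i => (js.filter (pvQm b)).map (fun j => (i, j)))) := by
  induction is generalizing v0 v1 v2 m with
  | nil => simp
  | cons i is ih =>
    rw [List.foldl_cons, pvRowA]
    simp [ih, List.append_assoc]

lemma pvBand_filter0 (b j : Int) : (pvBand b j == some 0) = pvQ0 b j := by
  have h : PySem.List.enumerate pvCentersB = [(0, 113), (1, 73), (2, 23)] := by decide
  simp only [pvBand, h, pvBandLoop]
  split_ifs <;> simp [pvQ0] <;> omega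
lemma pvBand_filter1 (b j : Int) : (pvBand b j == some 1) = pvQ1 b j := by
  have h : PySem.List.enumerate pvCentersB = [(0, 113), (1, 73), (2, 23)] := by decide
  simp only [pvBand, h, pvBandLoop]
  split_ifs <;> simp [pvQ0, pvQ1] <;> omega
lemma pvBand_filter2 (b j : Int) : (pvBand b j == some 2) = pvQ2 b j := by
  have h : PySem.List.enumerate pvCentersB = [(0, 113), (1, 73), (2, 23)] := by decide
  simp only [pvBand, h, pvBandLoop]
  split_ifs <;> simp [pvQ0, pvQ2] <;> omega
lemma pvBand_filterm (b j : Int) : (pvBand b j == none) = pvQm b j := by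
  have h : PySem.List.enumerate pvCentersB = [(0, 113), (1, 73), (2, 23)] := by decide
  simp only [pvBand, h, pvBandLoop]
  split_ifs <;> simp [pvQ0, pvQ1, pvQ2, pvQm] <;> omega

-- ===== VERDICT (by name: the statement is the Claim_ definition above) =====
theorem get_3_point_index_spec : Claim_equal_get_3_point_index := by
  intro length bandwidth _
  unfold Spec_get_3_point_index get_3_point_index get_3_point_index_alt
  rw [pvOuterA]
  have h3 : PySem.List.pyRange 0 3 1 = [0, 1, 2] := by decide
  simp only [h3, List.map_cons, List.map_nil]
  congr 1 <;> simp only [pvBand_filter0, pvBand_filter1, pvBand_filter2, pvBand_filterm] <;> simp
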